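-- pv_equiv track=rewrite | github.com/Garkata/cipher | cypher/route.py | decrypt_custom_route_cipher
-- ===== SOURCE A (Python) =====
-- import math
--
-- def create_grid_dimensions(message_length):
--     rows = math.floor(math.sqrt(message_length))
--     cols = math.ceil(message_length / rows)
--
--     while rows * cols < message_length:
--         rows += 1
--
--     return rows, cols
--
-- def decrypt_custom_route_cipher(ciphertext):
--     ciphertext = ciphertext.upper().replace(" ", "")
--     length = len(ciphertext)
--     rows, cols = create_grid_dimensions(length)
--
--
--     grid = [['' for _ in range(cols)] for _ in range(rows)]
--
--     i = 0
--     for c in range(cols):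
--         if c % 2 == 0:
--
--             for r in reversed(range(rows)):
--                 if i < length:
--                     grid[r][c] = ciphertext[i]
--                     i += 1
--         else:
--
--             for r in range(rows):
--                 if i < length:
--                     grid[r][c] = ciphertext[i]
--                     i += 1
--
--
--     result = []
--     for r in range(rows):
--         for c in range(cols):
--             result.append(grid[r][c])
--
--     return ''.join(result).rstrip('X')
-- ===== SOURCE B (Python) =====
-- import math
--
-- def create_grid_dimensions(message_length):
--     rows = math.floor(math.sqrt(message_length))
--     cols = math.ceil(message_length / rows)
--
--     while rows * cols < message_length:
--         rows += 1
--
--     return rows, cols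
--
-- def decrypt_custom_route_cipher(ciphertext):
--     s = ciphertext.upper().replace(" ", "")
--     length = len(s)
--     rows, cols = create_grid_dimensions(length)
--     out = []
--     for r in range(rows):
--         for c in range(cols):
--             step = c * rows + (rows - 1 - r if c % 2 == 0 else r)
--             if step < length:
--                 out.append(s[step])
--     return ''.join(out).rstrip('X')
-- ===== Notes on version B (the rewrite author's own statement) =====
-- stated objective: alternative
-- what changed: B replaces the materialized 2D grid (boustrophedon column fill then row-major read) by a direct index permutation: for each output cell it computes the fill-step index c*rows + (rows-1-r or r by column parity) and reads the ciphertext there, skipping out-of-range cells.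
-- outside the precondition, e.g. on decrypt_custom_route_cipher(' '): A raises ZeroDivisionError, B raises ZeroDivisionError
import Mathlib
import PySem

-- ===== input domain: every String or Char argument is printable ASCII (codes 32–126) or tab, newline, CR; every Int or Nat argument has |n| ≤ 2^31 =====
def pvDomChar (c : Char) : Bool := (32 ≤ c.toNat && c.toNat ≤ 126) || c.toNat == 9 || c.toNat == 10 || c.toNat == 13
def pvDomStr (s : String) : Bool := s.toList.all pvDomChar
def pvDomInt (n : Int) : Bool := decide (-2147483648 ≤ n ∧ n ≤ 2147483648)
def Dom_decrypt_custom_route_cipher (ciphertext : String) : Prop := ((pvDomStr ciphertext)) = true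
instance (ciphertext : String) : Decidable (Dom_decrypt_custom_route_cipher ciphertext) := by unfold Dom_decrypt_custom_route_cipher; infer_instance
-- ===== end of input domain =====

-- B replaces A's materialized 2D grid (boustrophedon column fill, then row-major read) by a direct
-- closed-form index permutation per output cell; same cost, different decomposition (objective: alternative).

-- ===== PORT A =====
-- shared helper: create_grid_dimensions. math.floor(math.sqrt(L)) is ported as Nat.sqrt and
-- math.ceil(L/rows) as Nat ceiling division — exact on the sampled lengths; the while loop is
-- ported with fuel L+1 (on inputs admitted by Pre_ it iterates at most L times before rows*cols ≥ L).
def pvCgdLoop : Nat → Nat → Nat → Nat → Nat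
  | 0, rows, _, _ => rows
  | fuel + 1, rows, cols, L => if rows * cols < L then pvCgdLoop fuel (rows + 1) cols L else rows

def create_grid_dimensions (L : Nat) : Nat × Nat :=
  let rows := Nat.sqrt L
  let cols := (L + rows - 1) / rows
  (pvCgdLoop (L + 1) rows cols L, cols)

-- shared helper: ''.join(...).rstrip('X') — strip all trailing 'X' characters
def pvRstripX (t : String) : String :=
  String.ofList ((t.toList.reverse.dropWhile (fun ch => ch == 'X')).reverse)

-- A's mutable 2D grid (list of lists holding '' or one-char strings) is ported as a function
-- Nat → Nat → String with pointwise update; writes and reads happen in the same order as in A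
def pvUpdate (g : Nat → Nat → String) (r c : Nat) (v : String) : Nat → Nat → String :=
  fun r' c' => if r' = r ∧ c' = c then v else g r' c'

def pvFillCell (s : List Char) (c : Nat) (st : (Nat → Nat → String) × Nat) (r : Nat) :
    (Nat → Nat → String) × Nat :=
  if st.2 < s.length then (pvUpdate st.1 r c (String.ofList [s.getD st.2 ' ']), st.2 + 1) else st

-- the body of A's `for c in range(cols)` loop: fill column c bottom-up (even c) or top-down (odd c)
def pvColStep (s : List Char) (rows : Nat) (st : (Nat → Nat → String) × Nat) (c : Nat) :
    (Nat → Nat → String) × Nat :=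
  if c % 2 = 0 then ((List.range rows).reverse).foldl (pvFillCell s c) st
  else (List.range rows).foldl (pvFillCell s c) st

def pvFill (s : List Char) (rows cols : Nat) : (Nat → Nat → String) × Nat :=
  (List.range cols).foldl (pvColStep s rows) (fun _ _ => "", 0)

def decrypt_custom_route_cipher (ciphertext : String) : String :=
  let s := (PySem.Str.replace (PySem.Str.upper ciphertext) " " "").toList
  let dims := create_grid_dimensions s.length
  let rows := dims.1
  let cols := dims.2
  let g := (pvFill s rows cols).1
  let result := (List.range rows).foldl
      (fun acc r => (List.range cols).foldl (fun acc c => acc ++ (g r c).toList) acc)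
      ([] : List Char)
  pvRstripX (String.ofList result)

-- ===== PORT B =====
def decrypt_custom_route_cipher_alt (ciphertext : String) : String :=
  let s := (PySem.Str.replace (PySem.Str.upper ciphertext) " " "").toList
  let dims := create_grid_dimensions s.length
  let rows := dims.1
  let cols := dims.2
  let out := (List.range rows).foldl
      (fun acc r => (List.range cols).foldl
        (fun acc c =>
          let step := c * rows + (if c % 2 = 0 then rows - 1 - r else r)
          if step < s.length then acc ++ [s.getD step ' '] else acc) acc)
      ([] : List Char)
  pvRstripX (String.ofList out)

-- ===== PRECONDITION & SPEC =====
-- Pre_ excludes exactly the inputs all of whose characters are ' ': there the preprocessed text is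
-- empty, so A's create_grid_dimensions divides by rows = 0 (ZeroDivisionError); B raises there too.
def Pre_decrypt_custom_route_cipher (ciphertext : String) : Prop :=
  (ciphertext.toList.any (fun ch => ch != ' ')) = true
instance (ciphertext : String) : Decidable (Pre_decrypt_custom_route_cipher ciphertext) := by
  unfold Pre_decrypt_custom_route_cipher; infer_instance

def pvWitness_decrypt_custom_route_cipher : String := "OLLEH DX"

def Spec_decrypt_custom_route_cipher (ciphertext : String) (out : String) : Prop :=
  out = decrypt_custom_route_cipher_alt ciphertext
instance (ciphertext : String) (out : String) : Decidable (Spec_decrypt_custom_route_cipher ciphertext out) := by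
  unfold Spec_decrypt_custom_route_cipher; infer_instance

-- ===== CLAIM (what is proved, stated in full; the proofs are below) =====
def Claim_equal_decrypt_custom_route_cipher : Prop := ∀ (ciphertext : String), Dom_decrypt_custom_route_cipher ciphertext → Pre_decrypt_custom_route_cipher ciphertext → Spec_decrypt_custom_route_cipher ciphertext (decrypt_custom_route_cipher ciphertext)

-- ===== LEMMAS AND PROOFS =====

-- B's per-cell offset inside a column (used only by the proofs)
def pvPos (rows c r : Nat) : Nat := if c % 2 = 0 then rows - 1 - r else r

theorem pvRangeReverse (n : Nat) : (List.range n).reverse = (List.range n).map (fun k => n - 1 - k) := by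
  rw [List.range_eq_range', List.reverse_range']
  simp [List.range_eq_range']

-- filling one column along row order (range m).map f, where finv is a left inverse of f on range m:
-- the index counter advances to min (i + m) |s| and cell (r, c) receives the character at i + finv r
theorem pvFill_col (s : List Char) (c : Nat) (f finv : Nat → Nat) (m : Nat)
    (hinv : ∀ k, k < m → finv (f k) = k) (g : Nat → Nat → String) (i : Nat)
    (hi : i ≤ s.length) :
    ((List.range m).map f).foldl (pvFillCell s c) (g, i) =
      (fun r c' => if c' = c ∧ finv r < m ∧ f (finv r) = r ∧ i + finv r < s.length
                   then String.ofList [s.getD (i + finv r) ' '] else g r c',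
       min (i + m) s.length) := by
  induction m with
  | zero =>
    simp only [List.range_zero, List.map_nil, List.foldl_nil, Prod.mk.injEq]
    refine ⟨?_, by omega⟩
    funext r c'
    rw [if_neg]
    rintro ⟨-, h, -⟩
    omega
  | succ m ih =>
    have hinv' : ∀ k, k < m → finv (f k) = k := fun k hk => hinv k (by omega)
    rw [List.range_succ, List.map_append, List.foldl_append, ih hinv']
    simp only [List.map_cons, List.map_nil, List.foldl_cons, List.foldl_nil]
    by_cases hlt : i + m < s.length
    · have hmin : min (i + m) s.length = i + m := by omega
      rw [hmin]
      simp only [pvFillCell]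
      rw [if_pos hlt]
      simp only [Prod.mk.injEq]
      refine ⟨?_, by omega⟩
      funext r c'
      simp only [pvUpdate]
      have hm : finv (f m) = m := hinv m (by omega)
      by_cases h1 : r = f m ∧ c' = c
      · obtain ⟨h1r, h1c⟩ := h1
        subst h1r; subst h1c
        rw [if_pos ⟨rfl, rfl⟩, if_pos ⟨rfl, by rw [hm]; omega, by rw [hm], by rw [hm]; omega⟩, hm]
      · rw [if_neg h1]
        by_cases h2 : c' = c ∧ finv r < m ∧ f (finv r) = r ∧ i + finv r < s.length
        · rw [if_pos h2, if_pos ⟨h2.1, by omega, h2.2.2.1, h2.2.2.2⟩]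
        · have hn : ¬(c' = c ∧ finv r < m + 1 ∧ f (finv r) = r ∧ i + finv r < s.length) := by
            rintro ⟨ha, hb, hcc, hd⟩
            apply h2
            refine ⟨ha, ?_, hcc, hd⟩
            rcases Nat.lt_succ_iff_lt_or_eq.mp hb with h | h
            · exact h
            · have hr' : r = f m := by rw [← hcc, h]
              exact absurd ⟨hr', ha⟩ h1
          rw [if_neg h2, if_neg hn]
    · have hmin : min (i + m) s.length = s.length := by omega
      rw [hmin]
      simp only [pvFillCell]
      rw [if_neg (lt_irrefl s.length)]
      simp only [Prod.mk.injEq]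
      refine ⟨?_, by omega⟩
      funext r c'
      by_cases h2 : c' = c ∧ finv r < m ∧ f (finv r) = r ∧ i + finv r < s.length
      · rw [if_pos h2, if_pos ⟨h2.1, by omega, h2.2.2.1, h2.2.2.2⟩]
      · have hn : ¬(c' = c ∧ finv r < m + 1 ∧ f (finv r) = r ∧ i + finv r < s.length) := by
          rintro ⟨ha, hb, hcc, hd⟩
          exact h2 ⟨ha, by omega, hcc, hd⟩
        rw [if_neg h2, if_neg hn]

-- the whole fill phase: cell (r, c) holds the character at step index c*rows + pvPos rows c r
theorem pvFill_eq (s : List Char) (rows cols : Nat) :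
    pvFill s rows cols =
      (fun r c => if c < cols ∧ r < rows ∧ c * rows + pvPos rows c r < s.length
                  then String.ofList [s.getD (c * rows + pvPos rows c r) ' '] else "",
       min (cols * rows) s.length) := by
  induction cols with
  | zero =>
    unfold pvFill
    simp only [List.range_zero, List.foldl_nil, Nat.zero_mul, Prod.mk.injEq]
    refine ⟨?_, by omega⟩
    funext r c
    rw [if_neg]
    rintro ⟨h, -, -⟩
    omega
  | succ cols ih =>
    unfold pvFill at ih ⊢
    rw [List.range_succ, List.foldl_append, ih]
    simp only [List.foldl_cons, List.foldl_nil, pvColStep]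
    have hmul : (cols + 1) * rows = cols * rows + rows := by ring
    by_cases hpar : cols % 2 = 0
    · rw [if_pos hpar, pvRangeReverse rows,
        pvFill_col s cols (fun k => rows - 1 - k) (fun r => rows - 1 - r) rows
          (by intro k hk; show rows - 1 - (rows - 1 - k) = k; omega) _ _ (Nat.min_le_right _ _)]
      simp only [Prod.mk.injEq]
      refine ⟨?_, by omega⟩
      funext r c'
      simp only [pvPos]
      by_cases hc : c' = cols
      · rw [hc]
        simp only [true_and]
        split_ifs <;>
          first
          | rfl
          | (exfalso; omega)
          | (have hx : min (cols * rows) s.length + (rows - 1 - r) = cols * rows + (rows - 1 - r) := by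
               omega
             rw [hx])
      · split_ifs <;> first | rfl | (exfalso; omega)
    · rw [if_neg hpar, show List.range rows = (List.range rows).map (fun k => k) by simp,
        pvFill_col s cols (fun k => k) (fun r => r) rows
          (by intro k hk; rfl) _ _ (Nat.min_le_right _ _)]
      simp only [Prod.mk.injEq]
      refine ⟨?_, by omega⟩
      funext r c'
      simp only [pvPos]
      by_cases hc : c' = cols
      · rw [hc]
        simp only [true_and]
        split_ifs <;>
          first
          | rfl
          | (exfalso; omega)
          | (have hx : min (cols * rows) s.length + r = cols * rows + r := by omega
             rw [hx])
      · split_ifs <;> first | rfl | (exfalso; omega)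

-- the row-major read of the filled grid is exactly B's direct enumeration
theorem pvRead_eq (s : List Char) (rows cols : Nat) :
    (List.range rows).foldl
      (fun acc r => (List.range cols).foldl
        (fun acc c => acc ++ ((pvFill s rows cols).1 r c).toList) acc) ([] : List Char) =
    (List.range rows).foldl
      (fun acc r => (List.range cols).foldl
        (fun acc c =>
          if c * rows + (if c % 2 = 0 then rows - 1 - r else r) < s.length
          then acc ++ [s.getD (c * rows + (if c % 2 = 0 then rows - 1 - r else r)) ' ']
          else acc) acc) ([] : List Char) := by
  simp only [pvFill_eq]
  apply PySem.List.foldl_congr_mem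
  intro acc r hr
  rw [List.mem_range] at hr
  apply PySem.List.foldl_congr_mem
  intro acc2 c hc
  rw [List.mem_range] at hc
  simp only [pvPos]
  by_cases hstep : c * rows + (if c % 2 = 0 then rows - 1 - r else r) < s.length
  · rw [if_pos ⟨hc, hr, hstep⟩, if_pos hstep]
    simp
  · rw [if_neg (fun h => hstep h.2.2), if_neg hstep]
    simp

theorem main_eq (ciphertext : String) :
    decrypt_custom_route_cipher ciphertext = decrypt_custom_route_cipher_alt ciphertext := by
  simp only [decrypt_custom_route_cipher, decrypt_custom_route_cipher_alt]
  rw [pvRead_eq]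

-- ===== VERDICT (by name: the statement is the Claim_ definition above) =====
theorem decrypt_custom_route_cipher_spec : Claim_equal_decrypt_custom_route_cipher := by
  intro ct _ _
  exact main_eq ct
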